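-- pv_equiv track=rewrite | github.com/ignajaja/coding-II | practica/parcial2.py | saltos
-- ===== SOURCE A (Python) =====
-- def saltos(lista, diferencia):
--     resultado = []
--
--     lista.append(lista[-1]+diferencia+1)
--
--     actual = 0
--     lista_actual = []
--
--     for i in range(len(lista)):
--         if i == 0:
--             continue
--
--         lista_actual.append(lista[i-1])
--
--         if abs(lista[i] - lista[i-1]) >= diferencia:
--             resultado.append([])
--             resultado[actual] = lista_actual
--             lista_actual = []
--             actual += 1
--
--
--     return resultado
-- ===== SOURCE B (Python) =====
-- def saltos(lista, diferencia):
--     # Side effect preserved: appends the sentinel to the caller's list, like A.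
--     lista.append(lista[-1] + diferencia + 1)
--     cortes = [i for i in range(1, len(lista)) if abs(lista[i] - lista[i - 1]) >= diferencia]
--     resultado = []
--     inicio = 0
--     for c in cortes:
--         resultado.append(lista[inicio:c])
--         inicio = c
--     return resultado
-- ===== Notes on version B (the rewrite author's own statement) =====
-- stated objective: alternative
-- what changed: B replaces A's single stateful index loop (accumulator list, manual group counter, append-then-set-by-index) by an index-then-slice decomposition: it first computes the list of cut indices with a comprehension, then emits each group as a slice lista[inicio:c] between consecutive cuts.
import Mathlib
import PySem

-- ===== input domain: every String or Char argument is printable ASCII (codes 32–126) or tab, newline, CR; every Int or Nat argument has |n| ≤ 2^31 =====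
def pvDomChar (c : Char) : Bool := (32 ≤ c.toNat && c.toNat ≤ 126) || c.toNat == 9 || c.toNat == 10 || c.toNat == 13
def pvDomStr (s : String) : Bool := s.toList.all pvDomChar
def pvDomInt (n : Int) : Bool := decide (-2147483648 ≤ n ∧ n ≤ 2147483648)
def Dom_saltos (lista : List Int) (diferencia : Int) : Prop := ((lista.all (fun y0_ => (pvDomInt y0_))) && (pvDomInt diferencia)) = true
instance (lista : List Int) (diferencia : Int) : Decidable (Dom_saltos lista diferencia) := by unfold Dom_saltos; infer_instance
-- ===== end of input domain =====

-- B is an alternative decomposition of the same O(n) task: cut indices first, then slices between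
-- consecutive cuts.  Both Pythons mutate the argument identically (append of the sentinel); the
-- equivalence proved here is about the RETURN value.

-- ===== PORT A =====
-- A's loop body as a step function over state (resultado, actual, lista_actual).
def saltosStepA (l2 : List Int) (diferencia : Int)
    (st : List (List Int) × Int × List Int) (i : Int) : List (List Int) × Int × List Int :=
  if i = 0 then st
  else
    let lista_actual := st.2.2 ++ [PySem.List.pyGetD l2 (i - 1) 0]
    if diferencia ≤ |PySem.List.pyGetD l2 i 0 - PySem.List.pyGetD l2 (i - 1) 0| then
      (PySem.List.pySetD (st.1 ++ [[]]) st.2.1 lista_actual, st.2.1 + 1, [])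
    else (st.1, st.2.1, lista_actual)

def saltos (lista : List Int) (diferencia : Int) : List (List Int) :=
  -- lista.append(lista[-1] + diferencia + 1); on lista = [] Python raises (excluded by Pre_)
  let l2 := lista ++ [PySem.List.pyGetD lista (-1) 0 + diferencia + 1]
  ((PySem.List.pyRange 0 (l2.length : Int) 1).foldl (saltosStepA l2 diferencia) ([], 0, [])).1

-- ===== PORT B =====
def saltos_alt (lista : List Int) (diferencia : Int) : List (List Int) :=
  let l2 := lista ++ [PySem.List.pyGetD lista (-1) 0 + diferencia + 1]
  let cortes := (PySem.List.pyRange 1 (l2.length : Int) 1).filter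
    (fun i => decide (diferencia ≤ |PySem.List.pyGetD l2 i 0 - PySem.List.pyGetD l2 (i - 1) 0|))
  (cortes.foldl
    (fun (st : List (List Int) × Int) c =>
      (st.1 ++ [PySem.List.slice l2 (some st.2) (some c)], c)) ([], 0)).1

-- ===== PRECONDITION & SPEC =====
-- Pre_ excludes only lista = [], where the Python A (and B) raise IndexError on lista[-1].
def Pre_saltos (lista : List Int) (diferencia : Int) : Prop := lista ≠ []
instance (lista : List Int) (diferencia : Int) : Decidable (Pre_saltos lista diferencia) := by
  unfold Pre_saltos; infer_instance

def pvWitness_saltos : List Int × Int := ([1, 2, 10, 11], 5)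

def Spec_saltos (lista : List Int) (diferencia : Int) (out : List (List Int)) : Prop := out = saltos_alt lista diferencia
instance (lista : List Int) (diferencia : Int) (out : List (List Int)) : Decidable (Spec_saltos lista diferencia out) := by unfold Spec_saltos; infer_instance

-- ===== CLAIM (what is proved, stated in full; the proofs are below) =====
def Claim_equal_saltos : Prop := ∀ (lista : List Int) (diferencia : Int), Dom_saltos lista diferencia → Pre_saltos lista diferencia → Spec_saltos lista diferencia (saltos lista diferencia)

-- ===== LEMMAS AND PROOFS =====

lemma slice_snoc (E : List Int) (p q : Int) (hp : 0 ≤ p) (hpq : p ≤ q) (hq : q < (E.length : Int)) :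
    PySem.List.slice E (some p) (some q) ++ [PySem.List.pyGetD E q 0]
      = PySem.List.slice E (some p) (some (q + 1)) := by
  have hq0 : 0 ≤ q := le_trans hp hpq
  rw [PySem.List.slice_toNat E hp hq0, PySem.List.slice_toNat E hp (by omega)]
  have hqn : q.toNat < E.length := by omega
  have hget : PySem.List.pyGetD E q 0 = E[q.toNat] := by
    rw [PySem.List.pyGetD_of_nonneg _ _ hq0]
    simp [List.getD_eq_getElem?_getD, List.getElem?_eq_getElem hqn]
  have h1 : (q + 1).toNat - p.toNat = (q.toNat - p.toNat) + 1 := by omega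
  rw [hget, h1, List.take_add_one]
  have h2 : p.toNat + (q.toNat - p.toNat) = q.toNat := by omega
  simp [List.getElem?_drop, h2, List.getElem?_eq_getElem hqn]

lemma saltos_core (E : List Int) (d : Int) :
    ∀ (k : Nat) (a : Int) (res : List (List Int)) (inicio : Int),
      1 ≤ a → 0 ≤ inicio → inicio ≤ a - 1 → (E.length : Int) - a ≤ (k : Int) →
      ((PySem.List.pyRange a (E.length : Int) 1).foldl (saltosStepA E d)
          (res, (res.length : Int), PySem.List.slice E (some inicio) (some (a - 1)))).1
        = (((PySem.List.pyRange a (E.length : Int) 1).filter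
              (fun i => decide (d ≤ |PySem.List.pyGetD E i 0 - PySem.List.pyGetD E (i - 1) 0|))).foldl
            (fun (st : List (List Int) × Int) c =>
              (st.1 ++ [PySem.List.slice E (some st.2) (some c)], c)) (res, inicio)).1 := by
  intro k
  induction k with
  | zero =>
    intro a res inicio h1 h2 h3 hk
    have hz : ((E.length : Int) - a).toNat = 0 := by omega
    rw [PySem.List.pyRange_one, hz]
    simp
  | succ k ih =>
    intro a res inicio h1 h2 h3 hk
    by_cases hlt : a < (E.length : Int)
    · rw [PySem.List.pyRange_one_cons hlt]
      have hcur : PySem.List.slice E (some inicio) (some (a - 1)) ++ [PySem.List.pyGetD E (a - 1) 0]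
          = PySem.List.slice E (some inicio) (some a) := by
        have := slice_snoc E inicio (a - 1) h2 h3 (by omega)
        simpa using this
      by_cases hcut : d ≤ |PySem.List.pyGetD E a 0 - PySem.List.pyGetD E (a - 1) 0|
      · rw [List.filter_cons_of_pos (by simpa using hcut), List.foldl_cons, List.foldl_cons]
        have hstep : saltosStepA E d (res, (res.length : Int), PySem.List.slice E (some inicio) (some (a - 1))) a
            = (res ++ [PySem.List.slice E (some inicio) (some a)], (res.length : Int) + 1, []) := by
          simp only [saltosStepA, if_neg (by omega : ¬ a = 0), hcur, if_pos hcut]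
          simp
        rw [hstep]
        have hlen2 : ((res ++ [PySem.List.slice E (some inicio) (some a)]).length : Int)
            = (res.length : Int) + 1 := by simp
        have hnil : ([] : List Int) = PySem.List.slice E (some a) (some (a + 1 - 1)) := by
          have : a + 1 - 1 = a := by ring
          rw [this, PySem.List.slice_toNat E (by omega) (by omega)]
          simp
        have := ih (a + 1) (res ++ [PySem.List.slice E (some inicio) (some a)]) a
          (by omega) (by omega) (by omega) (by omega)
        rw [hlen2, ← hnil] at this
        simpa using this
      · rw [List.filter_cons_of_neg (by simpa using hcut)]
        rw [List.foldl_cons]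
        have hstep : saltosStepA E d (res, (res.length : Int), PySem.List.slice E (some inicio) (some (a - 1))) a
            = (res, (res.length : Int), PySem.List.slice E (some inicio) (some (a + 1 - 1))) := by
          simp only [saltosStepA, if_neg (by omega : ¬ a = 0), hcur, if_neg hcut]
          norm_num
        rw [hstep]
        exact ih (a + 1) res inicio (by omega) (by omega) (by omega) (by omega)
    · have hz : ((E.length : Int) - a).toNat = 0 := by omega
      rw [PySem.List.pyRange_one, hz]
      simp

lemma saltos_main (E : List Int) (d : Int) (hlen : 1 ≤ (E.length : Int)) :
    ((PySem.List.pyRange 0 (E.length : Int) 1).foldl (saltosStepA E d) ([], 0, [])).1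
      = (((PySem.List.pyRange 1 (E.length : Int) 1).filter
            (fun i => decide (d ≤ |PySem.List.pyGetD E i 0 - PySem.List.pyGetD E (i - 1) 0|))).foldl
          (fun (st : List (List Int) × Int) c =>
            (st.1 ++ [PySem.List.slice E (some st.2) (some c)], c)) ([], 0)).1 := by
  rw [PySem.List.pyRange_one_cons (by omega : (0 : Int) < (E.length : Int)), List.foldl_cons]
  have h0 : saltosStepA E d ([], 0, []) 0 = ([], 0, []) := by simp [saltosStepA]
  rw [h0]
  have := saltos_core E d E.length 1 [] 0 (by omega) (by omega) (by omega) (by omega)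
  have hnil : PySem.List.slice E (some 0) (some (1 - 1)) = ([] : List Int) := by
    rw [(by ring : (1 : Int) - 1 = 0), PySem.List.slice_toNat E (by omega) (by omega)]
    simp
  rw [hnil] at this
  simpa using this

-- ===== VERDICT (by name: the statement is the Claim_ definition above) =====
theorem saltos_spec : Claim_equal_saltos := by
  intro lista diferencia _hDom _hPre
  exact saltos_main (lista ++ [PySem.List.pyGetD lista (-1) 0 + diferencia + 1]) diferencia
    (by simp)
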